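-- pv_equiv track=rewrite | github.com/Beliya470/Day2 | day2.py | solution
-- ===== SOURCE A (Python) =====
-- def solution(A, F, M):
--     current_sum = sum(A)
--     total_sum = M * (len(A) + F)
--     required_sum = total_sum - current_sum
--
--     if required_sum > F * 6 or required_sum < F:
--         return [0]
--
--     result = [1] * F
--     required_sum -= F
--
--     for i in range(F):
--         add = min(required_sum, 5)
--         result[i] += add
--         required_sum -= add
--
--     return result
-- ===== SOURCE B (Python) =====
-- def solution(A, F, M):
--     current_sum = sum(A)
--     total_sum = M * (len(A) + F)
--     required_sum = total_sum - current_sum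
--
--     if required_sum > F * 6 or required_sum < F:
--         return [0]
--
--     q, r = divmod(required_sum - F, 5)
--     return [6] * q + ([1 + r] if r else []) + [1] * (F - q - (1 if r else 0))
-- ===== Notes on version B (the rewrite author's own statement) =====
-- stated objective: simpler
-- what changed: Replaces the per-die greedy fill loop (mutating result[i] and decrementing the remainder F times) with a closed-form divmod: the result is built directly as q full sixes, one partial die, and ones.
import Mathlib
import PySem

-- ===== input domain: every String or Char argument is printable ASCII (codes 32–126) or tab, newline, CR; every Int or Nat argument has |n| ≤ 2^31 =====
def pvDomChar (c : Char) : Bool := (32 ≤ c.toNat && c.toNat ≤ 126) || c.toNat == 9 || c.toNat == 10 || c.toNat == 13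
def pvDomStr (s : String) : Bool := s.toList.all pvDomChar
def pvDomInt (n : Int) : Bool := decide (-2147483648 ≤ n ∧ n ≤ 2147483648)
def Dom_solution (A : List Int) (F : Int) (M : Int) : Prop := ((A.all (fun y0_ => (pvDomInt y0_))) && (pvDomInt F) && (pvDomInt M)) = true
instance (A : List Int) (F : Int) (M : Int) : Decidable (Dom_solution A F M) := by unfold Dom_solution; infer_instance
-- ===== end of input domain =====

-- B replaces A's greedy per-die fill loop with a closed-form divmod construction (simpler; same cost).

-- ===== PORT A =====
-- greedy loop body: add = min(required_sum, 5); result[i] += add; required_sum -= add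
def solStep (st : List Int × Int) (i : Int) : List Int × Int :=
  let add := min st.2 5
  (st.1.set i.toNat (st.1.getD i.toNat 0 + add), st.2 - add)

def solution (A : List Int) (F : Int) (M : Int) : List Int :=
  let current_sum := A.sum
  let total_sum := M * ((A.length : Int) + F)
  let required_sum := total_sum - current_sum
  if required_sum > F * 6 ∨ required_sum < F then [0]
  else
    ((PySem.List.pyRange 0 F 1).foldl solStep
      (List.replicate F.toNat 1, required_sum - F)).1

-- ===== PORT B =====
def solution_alt (A : List Int) (F : Int) (M : Int) : List Int :=
  let current_sum := A.sum
  let total_sum := M * ((A.length : Int) + F)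
  let required_sum := total_sum - current_sum
  if required_sum > F * 6 ∨ required_sum < F then [0]
  else
    let q := PySem.Int.floordiv (required_sum - F) 5
    let r := PySem.Int.mod (required_sum - F) 5
    List.replicate q.toNat 6 ++ (if r ≠ 0 then [1 + r] else []) ++
      List.replicate (F - q - (if r ≠ 0 then 1 else 0)).toNat 1

-- ===== PRECONDITION & SPEC =====
def Spec_solution (A : List Int) (F : Int) (M : Int) (out : List Int) : Prop := out = solution_alt A F M
instance (A : List Int) (F : Int) (M : Int) (out : List Int) : Decidable (Spec_solution A F M out) := by unfold Spec_solution; infer_instance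

-- ===== CLAIM (what is proved, stated in full; the proofs are below) =====
def Claim_equal_solution : Prop := ∀ (A : List Int) (F : Int) (M : Int), Dom_solution A F M → Spec_solution A F M (solution A F M)

-- ===== LEMMAS AND PROOFS =====

-- Characterisation of A's greedy loop over indices 0..n-1 (peeling the last index).
theorem solLoop_char (n : Nat) : ∀ (l : List Int) (rem : Int), 0 ≤ rem → n ≤ l.length →
    (List.range n).foldl (fun st (i : Nat) => solStep st (i : Int)) (l, rem)
    = ((List.range n).map (fun j => l.getD j 0 + min (max (rem - 5*(j:Int)) 0) 5) ++ l.drop n,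
       max (rem - 5*(n:Int)) 0) := by
  induction n with
  | zero => intro l rem h0 _; simp; omega
  | succ n ih =>
    intro l rem h0 hn
    have hn' : n < l.length := by omega
    rw [List.range_succ, List.foldl_append, ih l rem h0 (by omega)]
    simp only [List.foldl_cons, List.foldl_nil]
    have hmlen : ((List.range n).map (fun j => l.getD j 0 + min (max (rem - 5*(j:Int)) 0) 5)).length = n := by
      simp
    unfold solStep
    simp only [Int.toNat_natCast]
    refine Prod.ext ?_ ?_
    · simp only [List.map_append, List.map_cons, List.map_nil]
      rw [List.drop_eq_getElem_cons hn']
      rw [show ((List.map (fun j => l.getD j 0 + min (max (rem - 5*(j:Int)) 0) 5) (List.range n)) ++ l[n] :: List.drop (n+1) l).getD n 0 = l[n] from ?_]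
      · rw [List.set_append_right _ _ (by omega), hmlen]
        simp [List.append_assoc, List.getD_eq_getElem?_getD, List.getElem?_eq_getElem hn']
        rw [List.drop_eq_getElem_cons hn']; rfl
      · rw [List.getD_eq_getElem?_getD, List.getElem?_append_right (by omega), hmlen]
        simp [List.getElem?_eq_getElem hn']
    · simp only []
      push_cast
      omega

-- B's closed-form list equals the elementwise description of A's greedy fill.
theorem closedForm (n : Nat) (rem q r : Int) (hq : 0 ≤ q) (hr : 0 ≤ r) (hr5 : r < 5)
    (hrem : rem = 5*q + r) (hle : rem ≤ 5*(n:Int)) :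
    List.replicate q.toNat 6 ++ (if r ≠ 0 then [1+r] else []) ++
      List.replicate ((n:Int) - q - (if r ≠ 0 then 1 else 0)).toNat 1
    = (List.range n).map (fun (j : Nat) => 1 + min (max (rem - 5*(j:Int)) 0) 5) := by
  subst hrem
  apply List.ext_getElem?
  intro i
  have hR : ((List.range n).map (fun (j : Nat) => 1 + min (max (5*q+r - 5*(j:Int)) 0) 5))[i]?
      = if i < n then some (1 + min (max (5*q+r - 5*(i:Int)) 0) 5) else none := by
    rw [List.getElem?_map]
    rcases Nat.lt_or_ge i n with h | h
    · rw [List.getElem?_range h, if_pos h]; rfl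
    · rw [List.getElem?_eq_none (by simpa using h), if_neg (by omega)]; rfl
  rw [hR]
  have hone : (([1+r] : List Int)) = List.replicate 1 (1+r) := rfl
  by_cases hrz : r = 0 <;>
    simp only [hrz, ne_eq, not_true_eq_false, not_false_eq_true, if_true, if_false, hone,
      List.getElem?_append, List.getElem?_replicate, List.length_replicate, List.append_nil, List.length_append] <;>
    split_ifs <;>
    first
      | rfl
      | omega
      | (simp only [Option.some.injEq]; omega)

theorem solution_spec : Claim_equal_solution := by
  intro A F M _
  unfold Spec_solution solution solution_alt
  simp only []
  set rs := M * ((A.length : Int) + F) - A.sum with hrs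
  by_cases hg : rs > F * 6 ∨ rs < F
  · simp [hg]
  · simp only [hg, if_false]
    have hFle : F ≤ rs ∧ rs ≤ F * 6 := by push Not at hg; omega
    have hF0 : 0 ≤ F := by omega
    have hrem0 : 0 ≤ rs - F := by omega
    have hremle : rs - F ≤ 5 * ((F.toNat : Int)) := by omega
    -- evaluate A's loop
    rw [PySem.List.pyRange_one, List.foldl_map]
    have hcast : ∀ (k : Nat), ((0:Int) + (k:Int)) = (k : Int) := by intro k; ring
    have hloop := solLoop_char (F - 0).toNat (List.replicate F.toNat 1) (rs - F) hrem0
      (by simp)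
    simp only [sub_zero] at hloop ⊢
    have hstep : (fun (st : List Int × Int) (k : Nat) => solStep st ((0:Int) + (k:Int)))
        = (fun st (k : Nat) => solStep st (k : Int)) := by
      funext st k; rw [hcast]
    rw [hstep, hloop]
    -- evaluate B's arithmetic
    rw [PySem.Int.floordiv_eq_ediv_of_pos (by norm_num), PySem.Int.mod_eq_emod_of_pos (by norm_num)]
    have hq : 0 ≤ (rs - F) / 5 := Int.ediv_nonneg hrem0 (by norm_num)
    have hr : 0 ≤ (rs - F) % 5 := Int.emod_nonneg _ (by norm_num)
    have hr5 : (rs - F) % 5 < 5 := Int.emod_lt_of_pos _ (by norm_num)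
    have hFcast : ((F.toNat : Int)) = F := Int.toNat_of_nonneg hF0
    have hBeq := closedForm F.toNat (rs - F) ((rs - F)/5) ((rs-F)%5) hq hr hr5 (by omega)
      (by omega)
    rw [hFcast] at hBeq
    simp only [List.drop_replicate, Nat.sub_self, List.replicate_zero, List.append_nil]
    rw [hBeq]
    apply List.map_congr_left
    intro j hj
    have hj' : j < F.toNat := List.mem_range.mp hj
    simp [List.getD_eq_getElem?_getD, hj']
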